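-- pv_equiv track=rewrite | github.com/MatteoAndriolo/Neural_Dependency_Parsing | project/utilsbert.py | match_subtokens
-- ===== SOURCE A (Python) =====
-- def match_subtokens(l1:list[str], l2:list[str]):
--     # Create output list
--     output:list[list[int]] = []
--     # Initialize index for l2
--     index = 0
--     # Iterate through l1
--     for token in l1:
--         subtoken_indices = []
--         # Get the indices of the subtokens
--         while index < len(l2) and (not subtoken_indices or l2[index].startswith("#")):
--             subtoken_indices.append(index)
--             index += 1
--         # Append subtoken indices to output
--         output.append(subtoken_indices)
--     return output
-- ===== SOURCE B (Python) =====
-- def match_subtokens(l1: list[str], l2: list[str]):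
--     # Pass 1: group l2 indices (a token starts a new group unless it is a
--     # '#'-continuation; the very first token is always a group head).
--     groups: list[list[int]] = []
--     for i, tok in enumerate(l2):
--         if i == 0 or not tok.startswith("#"):
--             groups.append([i])
--         else:
--             groups[-1].append(i)
--     # Pass 2: align groups to l1 (truncate extras, pad with []).
--     return [groups[j] if j < len(groups) else [] for j in range(len(l1))]
-- ===== Notes on version B (the rewrite author's own statement) =====
-- stated objective: alternative
-- what changed: Replaces A's interleaved while-loop that threads an l2 index through the l1 loop with two decoupled passes: one enumerate pass building a grouping table of l2 subtoken indices, then a separate alignment pass over range(len(l1)) that truncates extra groups and pads missing ones with [].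
import Mathlib
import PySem

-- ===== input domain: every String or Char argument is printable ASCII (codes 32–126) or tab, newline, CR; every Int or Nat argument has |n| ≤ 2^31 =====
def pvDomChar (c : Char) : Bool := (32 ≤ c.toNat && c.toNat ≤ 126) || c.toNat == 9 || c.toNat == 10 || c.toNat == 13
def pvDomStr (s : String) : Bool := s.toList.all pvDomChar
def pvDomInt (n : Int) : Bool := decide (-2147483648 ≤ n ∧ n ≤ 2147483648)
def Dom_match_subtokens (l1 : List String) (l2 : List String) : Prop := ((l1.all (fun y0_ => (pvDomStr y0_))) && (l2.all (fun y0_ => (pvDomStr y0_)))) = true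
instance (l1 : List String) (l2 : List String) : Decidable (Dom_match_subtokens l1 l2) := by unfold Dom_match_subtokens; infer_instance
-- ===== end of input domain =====

-- B replaces A's interleaved index-threading while-loop with a precomputed grouping
-- table over l2 plus a separate pad/truncate alignment pass over l1 (objective: alternative).

-- ===== PORT A =====
-- the inner 'while index < len(l2) and (not subtoken_indices or l2[index].startswith("#"))' loop
def pvWhileA (l2 : List String) (index : Int) (acc : List Int) : List Int × Int :=
  if index < (l2.length : Int) ∧ (acc = [] ∨ PySem.Str.startswith (PySem.List.pyGetD l2 index "") "#" = true) then
    pvWhileA l2 (index + 1) (acc ++ [index])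
  else (acc, index)
termination_by ((l2.length : Int) - index).toNat
decreasing_by omega

def match_subtokens (l1 : List String) (l2 : List String) : List (List Int) :=
  (l1.foldl (fun (st : List (List Int) × Int) _token =>
      let r := pvWhileA l2 st.2 []
      (st.1 ++ [r.1], r.2)) ([], 0)).1

-- ===== PORT B =====
-- one step of B's grouping loop: 'if i == 0 or not tok.startswith("#"): groups.append([i]) else: groups[-1].append(i)'
def pvGrpStep (gs : List (List Int)) (p : Int × String) : List (List Int) :=
  if p.1 = 0 ∨ PySem.Str.startswith p.2 "#" = false then gs ++ [[p.1]]
  else gs.dropLast ++ [gs.getLastD [] ++ [p.1]]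

def match_subtokens_alt (l1 : List String) (l2 : List String) : List (List Int) :=
  let groups := (PySem.List.enumerate l2).foldl pvGrpStep []
  (List.range l1.length).map (fun j => if j < groups.length then groups.getD j [] else [])

-- ===== PRECONDITION & SPEC =====
def Spec_match_subtokens (l1 : List String) (l2 : List String) (out : List (List Int)) : Prop := out = match_subtokens_alt l1 l2
instance (l1 : List String) (l2 : List String) (out : List (List Int)) : Decidable (Spec_match_subtokens l1 l2 out) := by unfold Spec_match_subtokens; infer_instance

-- ===== CLAIM (what is proved, stated in full; the proofs are below) =====
def Claim_equal_match_subtokens : Prop := ∀ (l1 : List String) (l2 : List String), Dom_match_subtokens l1 l2 → Spec_match_subtokens l1 l2 (match_subtokens l1 l2)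

-- ===== LEMMAS AND PROOFS =====

-- structural '#'-continuation run of a suffix of l2, labelled with absolute indices from i
def pvHashRunL : List String → Int → List Int
  | [], _ => []
  | t :: r, i => if PySem.Str.startswith t "#" = true then i :: pvHashRunL r (i + 1) else []

def pvIsHash (t : String) : Bool := PySem.Str.startswith t "#"

-- structural grouping of a suffix of l2, labelled with absolute indices from i
def pvGrAllL : List String → Int → List (List Int)
  | [], _ => []
  | t :: r, i =>
      (i :: pvHashRunL r (i + 1)) ::
        pvGrAllL (r.dropWhile pvIsHash) (i + 1 + (pvHashRunL r (i + 1)).length)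
termination_by l _ => l.length
decreasing_by
  have := List.length_dropWhile_le pvIsHash r
  simp only [List.length_cons]; omega

theorem pvHashRunL_length (r : List String) : ∀ i : Int,
    (pvHashRunL r i).length = (r.takeWhile pvIsHash).length := by
  induction r with
  | nil => intro i; simp [pvHashRunL]
  | cons t r ih =>
      intro i
      simp only [pvHashRunL, List.takeWhile_cons, pvIsHash]
      by_cases h : PySem.Str.startswith t "#" = true
      · rw [if_pos h, if_pos h]; simp [ih]
      · rw [if_neg h, if_neg h]; simp

theorem pvDrop_takeWhile {α : Type} (p : α → Bool) : ∀ (l : List α),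
    l.drop (l.takeWhile p).length = l.dropWhile p := by
  intro l
  induction l with
  | nil => simp
  | cons a l ih =>
      by_cases h : p a = true
      · simpa [List.dropWhile_cons, h] using ih
      · simp [h]

-- pvWhileA with a nonempty accumulator collects exactly the '#'-run starting at index i
theorem pvWhileA_acc (l2 : List String) : ∀ (r : List String) (i : Int) (acc : List Int),
    0 ≤ i → l2.drop i.toNat = r → acc ≠ [] →
    pvWhileA l2 i acc = (acc ++ pvHashRunL r i, i + (pvHashRunL r i).length) := by
  intro r
  induction r with
  | nil =>
      intro i acc hi hdrop hacc
      have hlen : (l2.length : Int) ≤ i := by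
        have := List.drop_eq_nil_iff.mp hdrop
        omega
      rw [pvWhileA]
      simp [pvHashRunL, hacc, not_lt.mpr hlen]
  | cons t r ih =>
      intro i acc hi hdrop hacc
      have hlt : i.toNat < l2.length := by
        by_contra h
        rw [List.drop_eq_nil_iff.mpr (by omega)] at hdrop
        simp at hdrop
      have hget : PySem.List.pyGetD l2 i "" = t := by
        rw [PySem.List.pyGetD_eq_getElem l2 "" hi (by omega)]
        have h0 : l2[i.toNat]? = some t := by
          have h : (List.drop i.toNat l2)[0]? = l2[i.toNat + 0]? := List.getElem?_drop
          rw [hdrop] at h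
          simpa using h.symm
        rw [List.getElem?_eq_getElem hlt] at h0
        exact Option.some_injective _ h0
      have hdrop' : l2.drop (i + 1).toNat = r := by
        have h1 : (i + 1).toNat = i.toNat + 1 := by omega
        rw [h1, ← List.drop_drop]
        rw [hdrop]
        rfl
      rw [pvWhileA]
      by_cases hsw : PySem.Str.startswith t "#" = true
      · have hcond : i < (l2.length : Int) ∧ (acc = [] ∨ PySem.Str.startswith (PySem.List.pyGetD l2 i "") "#" = true) := by
          exact ⟨by omega, Or.inr (by rw [hget]; exact hsw)⟩
        rw [if_pos hcond]
        rw [ih (i + 1) (acc ++ [i]) (by omega) hdrop' (by simp)]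
        simp only [pvHashRunL]
        rw [if_pos hsw]
        simp
        omega
      · have hcond : ¬ (i < (l2.length : Int) ∧ (acc = [] ∨ PySem.Str.startswith (PySem.List.pyGetD l2 i "") "#" = true)) := by
          rintro ⟨-, h | h⟩
          · exact hacc h
          · rw [hget] at h; exact hsw h
        rw [if_neg hcond]
        simp only [pvHashRunL]
        rw [if_neg hsw]
        simp
-- pvWhileA with the empty accumulator: the first available token is always taken
theorem pvWhileA_nil (l2 : List String) (r : List String) (i : Int)
    (hi : 0 ≤ i) (hdrop : l2.drop i.toNat = r) :
    pvWhileA l2 i [] =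
      (match r with
       | [] => ([], i)
       | _ :: rs => (i :: pvHashRunL rs (i + 1), i + 1 + (pvHashRunL rs (i + 1)).length)) := by
  cases r with
  | nil =>
      have hlen : (l2.length : Int) ≤ i := by
        have := List.drop_eq_nil_iff.mp hdrop
        omega
      rw [pvWhileA]
      simp [not_lt.mpr hlen]
  | cons t rs =>
      have hlt : i.toNat < l2.length := by
        by_contra h
        rw [List.drop_eq_nil_iff.mpr (by omega)] at hdrop
        simp at hdrop
      have hdrop' : l2.drop (i + 1).toNat = rs := by
        have h1 : (i + 1).toNat = i.toNat + 1 := by omega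
        rw [h1, ← List.drop_drop, hdrop]
        rfl
      rw [pvWhileA]
      rw [if_pos ⟨by omega, Or.inl rfl⟩]
      simp only [List.nil_append]
      rw [pvWhileA_acc l2 rs (i + 1) [i] (by omega) hdrop' (by simp)]
      simp

-- B's grouping fold, past the first token, produces the structural grouping
theorem pvFold_enum : ∀ (r : List String) (i : Int) (acc : List (List Int)) (g : List Int),
    1 ≤ i →
    (PySem.List.enumerate r i).foldl pvGrpStep (acc ++ [g]) =
      acc ++ (g ++ pvHashRunL r i) ::
        pvGrAllL (r.dropWhile pvIsHash) (i + (pvHashRunL r i).length) := by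
  intro r
  induction r with
  | nil =>
      intro i acc g hi
      simp [PySem.List.enumerate_nil, pvHashRunL, pvGrAllL]
  | cons t rs ih =>
      intro i acc g hi
      rw [PySem.List.enumerate_cons]
      by_cases hsw : PySem.Str.startswith t "#" = true
      · have hstep : pvGrpStep (acc ++ [g]) (i, t) = acc ++ [g ++ [i]] := by
          rw [pvGrpStep]
          rw [if_neg]
          · simp
          · rintro (h0 | hf)
            · omega
            · rw [hsw] at hf; exact Bool.noConfusion hf
        simp only [List.foldl_cons, hstep]
        rw [ih (i + 1) acc (g ++ [i]) (by omega)]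
        simp only [pvHashRunL, List.dropWhile_cons, pvIsHash]
        rw [if_pos hsw, if_pos hsw]
        simp only [List.append_assoc, List.singleton_append, List.length_cons]
        congr 2
        push_cast
        ring_nf
      · have hstep : pvGrpStep (acc ++ [g]) (i, t) = (acc ++ [g]) ++ [[i]] := by
          rw [pvGrpStep]
          rw [if_pos (Or.inr (by rw [Bool.not_eq_true] at hsw; exact hsw))]
        simp only [List.foldl_cons, hstep]
        rw [ih (i + 1) (acc ++ [g]) [i] (by omega)]
        simp only [pvHashRunL, List.dropWhile_cons, pvIsHash]
        rw [if_neg hsw, if_neg hsw]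
        simp [pvGrAllL]
theorem pvGroups_eq (l2 : List String) :
    (PySem.List.enumerate l2).foldl pvGrpStep [] = pvGrAllL l2 0 := by
  cases l2 with
  | nil => simp [PySem.List.enumerate_nil, pvGrAllL]
  | cons t rs =>
      have h0 : PySem.List.enumerate (t :: rs) 0 = (0, t) :: PySem.List.enumerate rs 1 := by
        rw [PySem.List.enumerate_cons]; norm_num
      rw [h0]
      have hstep : pvGrpStep [] ((0 : Int), t) = [] ++ [[(0 : Int)]] := by
        rw [pvGrpStep]
        rw [if_pos (Or.inl rfl)]
      simp only [List.foldl_cons, hstep]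
      rw [pvFold_enum rs 1 [] [0] le_rfl]
      simp [pvGrAllL]

-- A's outer for-loop as structural recursion over l1
def pvSpecRec (l2 : List String) : List String → Int → List (List Int)
  | [], _ => []
  | _ :: ts, i => (pvWhileA l2 i []).1 :: pvSpecRec l2 ts (pvWhileA l2 i []).2

theorem pvFoldA (l2 : List String) : ∀ (l1 : List String) (out : List (List Int)) (i : Int),
    (l1.foldl (fun (st : List (List Int) × Int) _token =>
        let r := pvWhileA l2 st.2 []
        (st.1 ++ [r.1], r.2)) (out, i)).1 = out ++ pvSpecRec l2 l1 i := by
  intro l1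
  induction l1 with
  | nil => intro out i; simp [pvSpecRec]
  | cons t ts ih =>
      intro out i
      simp only [List.foldl_cons]
      rw [ih]
      simp [pvSpecRec]

-- alignment: A's recursion equals lookup into the structural grouping table
theorem pvAlign (l2 : List String) : ∀ (l1 : List String) (r : List String) (i : Int),
    0 ≤ i → l2.drop i.toNat = r →
    pvSpecRec l2 l1 i =
      (List.range l1.length).map
        (fun j => if j < (pvGrAllL r i).length then (pvGrAllL r i).getD j [] else []) := by
  intro l1
  induction l1 with
  | nil => intro r i _ _; simp [pvSpecRec]
  | cons t ts ih =>
      intro r i hi hdrop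
      cases r with
      | nil =>
          rw [pvSpecRec]
          rw [pvWhileA_nil l2 [] i hi hdrop]
          simp only [pvGrAllL]
          rw [ih [] i hi hdrop]
          simp [pvGrAllL, List.range_succ_eq_map, List.map_const']
          simp [Function.comp_def, List.map_const']
      | cons h rs =>
          rw [pvSpecRec]
          rw [pvWhileA_nil l2 (h :: rs) i hi hdrop]
          simp only [pvGrAllL]
          set i' : Int := i + 1 + (pvHashRunL rs (i + 1)).length with hi'
          have hdrop' : l2.drop i'.toNat = rs.dropWhile pvIsHash := by
            have h1 : i'.toNat = i.toNat + 1 + (rs.takeWhile pvIsHash).length := by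
              rw [hi', pvHashRunL_length]
              omega
            rw [h1]
            have h2 : l2.drop (i.toNat + 1) = rs := by
              rw [← List.drop_drop, hdrop]; rfl
            calc l2.drop (i.toNat + 1 + (rs.takeWhile pvIsHash).length)
                = (l2.drop (i.toNat + 1)).drop (rs.takeWhile pvIsHash).length := by
                  rw [← List.drop_drop]
              _ = rs.drop (rs.takeWhile pvIsHash).length := by rw [h2]
              _ = rs.dropWhile pvIsHash := pvDrop_takeWhile pvIsHash rs
          have hi2 : (0:ℤ) ≤ i' := by omega
          rw [ih (rs.dropWhile pvIsHash) i' hi2 hdrop']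
          simp only [List.length_cons]
          rw [List.range_succ_eq_map]
          simp only [List.map_cons, List.map_map]
          congr 1
          apply List.map_congr_left
          intro j _
          simp [Function.comp]

-- ===== VERDICT (by name: the statement is the Claim_ definition above) =====
theorem match_subtokens_spec : Claim_equal_match_subtokens := by
  intro l1 l2 _
  show match_subtokens l1 l2 = match_subtokens_alt l1 l2
  rw [match_subtokens, match_subtokens_alt]
  rw [pvFoldA l2 l1 [] 0]
  rw [pvAlign l2 l1 l2 0 le_rfl (by simp)]
  rw [pvGroups_eq l2]
  simp
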